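-- pv_equiv track=rewrite | github.com/mammuth/Project-Euler-Solutions | solutions/problem_028.py | spiral_diag_numbers
-- ===== SOURCE A (Python) =====
-- def spiral_diag_numbers(gridsize):
--     numbers = [1]
--     # number of result numbers is < 2*gridsize - 1
--     incrementor = 2
--     while len(numbers) < 2*gridsize - 1:
--         for _ in range(4):
--             numbers.append(numbers[-1] + incrementor)
--         incrementor += 2  # incrementor increases with 2 every 4 elements
--     return numbers
-- ===== SOURCE B (Python) =====
-- def spiral_diag_numbers(gridsize):
--     # closed form: r rings of 4 corners each; corner j of ring k is (2k-1)**2 + 2*k*j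
--     r = max(0, -(-(gridsize - 1) // 2))
--     return [1] + [(2 * ((i + 3) // 4) - 1) ** 2 + 2 * ((i + 3) // 4) * ((i - 1) % 4 + 1)
--                   for i in range(1, 4 * r + 1)]
-- ===== Notes on version B (the rewrite author's own statement) =====
-- stated objective: simpler
-- what changed: Replaces the while-loop with its running last-value/incrementor accumulators and inner 4-step append loop by a closed-form index-to-value formula: ring count r = max(0, ceil((gridsize-1)/2)) and one comprehension mapping each index i to (2k-1)**2 + 2k*j with k=(i+3)//4, j=(i-1)%4+1.
import Mathlib
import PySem

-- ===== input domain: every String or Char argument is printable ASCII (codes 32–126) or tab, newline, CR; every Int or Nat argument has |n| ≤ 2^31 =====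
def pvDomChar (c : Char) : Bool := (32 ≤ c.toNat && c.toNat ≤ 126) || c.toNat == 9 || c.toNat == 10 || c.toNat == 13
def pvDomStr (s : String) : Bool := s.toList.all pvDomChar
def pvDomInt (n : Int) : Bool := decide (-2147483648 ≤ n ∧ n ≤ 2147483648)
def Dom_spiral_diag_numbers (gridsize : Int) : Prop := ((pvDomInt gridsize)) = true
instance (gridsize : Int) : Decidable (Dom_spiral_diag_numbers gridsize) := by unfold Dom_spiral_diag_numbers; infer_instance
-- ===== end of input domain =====

-- B computes the same diagonal list by a closed-form index formula instead of A's running accumulators (objective: simpler).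

-- ===== PORT A =====
-- numbers.append(numbers[-1] + incrementor); numbers is never empty, so the `.getD 0` default is never used
def pushA (numbers : List Int) (inc : Int) : List Int :=
  numbers ++ [(PySem.List.pyGet? numbers (-1)).getD 0 + inc]

theorem pushA_length (numbers : List Int) (inc : Int) :
    (pushA numbers inc).length = numbers.length + 1 := by
  simp [pushA]

-- while len(numbers) < 2*gridsize - 1: (4 appends) ; incrementor += 2
def loopA (gridsize : Int) (numbers : List Int) (inc : Int) : List Int :=
  if ((numbers.length : Int)) < 2 * gridsize - 1 then
    loopA gridsize (pushA (pushA (pushA (pushA numbers inc) inc) inc) inc) (inc + 2)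
  else numbers
termination_by (2 * gridsize - 1 - numbers.length).toNat
decreasing_by
  simp only [pushA_length]
  omega

def spiral_diag_numbers (gridsize : Int) : List Int :=
  loopA gridsize [1] 2

-- ===== PORT B =====
def spiral_diag_numbers_alt (gridsize : Int) : List Int :=
  let r := max 0 (-(PySem.Int.floordiv (-(gridsize - 1)) 2))
  1 :: (PySem.List.pyRange 1 (4 * r + 1) 1).map (fun i =>
    (2 * (PySem.Int.floordiv (i + 3) 4) - 1) ^ 2
      + 2 * (PySem.Int.floordiv (i + 3) 4) * (PySem.Int.mod (i - 1) 4 + 1))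

-- ===== PRECONDITION & SPEC =====
def Spec_spiral_diag_numbers (gridsize : Int) (out : List Int) : Prop := out = spiral_diag_numbers_alt gridsize
instance (gridsize : Int) (out : List Int) : Decidable (Spec_spiral_diag_numbers gridsize out) := by unfold Spec_spiral_diag_numbers; infer_instance

-- ===== CLAIM (what is proved, stated in full; the proofs are below) =====
def Claim_equal_spiral_diag_numbers : Prop := ∀ (gridsize : Int), Dom_spiral_diag_numbers gridsize → Spec_spiral_diag_numbers gridsize (spiral_diag_numbers gridsize)

-- ===== LEMMAS AND PROOFS =====

-- closed-form value of the n-th (0-based) appended diagonal number, shaped like B's formula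
def valN (n : Nat) : Int :=
  (2 * ((n / 4 + 1 : Nat) : Int) - 1) ^ 2
    + 2 * ((n / 4 + 1 : Nat) : Int) * (((n % 4 : Nat) : Int) + 1)

-- the list after r complete rings
def F (r : Nat) : List Int := 1 :: (List.range (4 * r)).map valN

theorem lenF (r : Nat) : ((F r).length : Int) = 1 + 4 * r := by
  simp [F]; ring

theorem lastF (r : Nat) : (F r).getLast? = some ((2 * (r : Int) + 1) ^ 2) := by
  cases r with
  | zero => simp [F]
  | succ m =>
    have h4 : 4 * (m + 1) = (4 * m + 3) + 1 := by omega
    rw [F, h4, List.range_succ, List.map_append]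
    have hd : (4 * m + 3) / 4 = m := by omega
    have hm : (4 * m + 3) % 4 = 3 := by omega
    have hv : valN (4 * m + 3) = (2 * ((m + 1 : Nat) : Int) + 1) ^ 2 := by
      simp [valN, hd, hm]; ring
    simp only [List.map_cons, List.map_nil, hv]
    rw [← List.cons_append, List.getLast?_concat]

theorem stepF (r : Nat) :
    pushA (pushA (pushA (pushA (F r) (2 * (r : Int) + 2)) (2 * (r : Int) + 2)) (2 * (r : Int) + 2)) (2 * (r : Int) + 2)
      = F (r + 1) := by
  have h0 : PySem.List.pyGet? (F r) (-1) = some ((2 * (r : Int) + 1) ^ 2) := by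
    rw [PySem.List.pyGet?_neg_one, lastF]
  have p1 : pushA (F r) (2 * (r : Int) + 2)
      = F r ++ [(2 * (r : Int) + 1) ^ 2 + (2 * (r : Int) + 2)] := by
    rw [pushA, h0, Option.getD_some]
  have pushA_concat : ∀ (xs : List Int) (x inc : Int),
      pushA (xs ++ [x]) inc = (xs ++ [x]) ++ [x + inc] := by
    intro xs x inc
    rw [pushA, PySem.List.pyGet?_neg_one_append_singleton, Option.getD_some]
  rw [p1, pushA_concat, pushA_concat, pushA_concat]
  have h4 : 4 * (r + 1) = (((4 * r + 1) + 1) + 1) + 1 := by omega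
  conv_rhs => rw [F]
  rw [h4, List.range_succ, List.range_succ, List.range_succ, List.range_succ]
  have e0 : valN (4 * r) = (2 * (r : Int) + 1) ^ 2 + (2 * (r : Int) + 2) := by
    have hd : (4 * r) / 4 = r := by omega
    have hm : (4 * r) % 4 = 0 := by omega
    simp [valN, hd, hm]; ring
  have e1 : valN (4 * r + 1) = ((2 * (r : Int) + 1) ^ 2 + (2 * (r : Int) + 2)) + (2 * (r : Int) + 2) := by
    have hd : (4 * r + 1) / 4 = r := by omega
    have hm : (4 * r + 1) % 4 = 1 := by omega
    simp [valN, hd, hm]; ring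
  have e2 : valN (4 * r + 2) = (((2 * (r : Int) + 1) ^ 2 + (2 * (r : Int) + 2)) + (2 * (r : Int) + 2)) + (2 * (r : Int) + 2) := by
    have hd : (4 * r + 2) / 4 = r := by omega
    have hm : (4 * r + 2) % 4 = 2 := by omega
    simp [valN, hd, hm]; ring
  have e3 : valN (4 * r + 3) = ((((2 * (r : Int) + 1) ^ 2 + (2 * (r : Int) + 2)) + (2 * (r : Int) + 2)) + (2 * (r : Int) + 2)) + (2 * (r : Int) + 2) := by
    have hd : (4 * r + 3) / 4 = r := by omega
    have hm : (4 * r + 3) % 4 = 3 := by omega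
    simp [valN, hd, hm]; ring
  simp [F, e0, e1, e2, e3]

-- ring counter with exactly loopA's recursion structure
def ringsA (g : Int) (r : Nat) : Nat :=
  if (1 + 4 * (r : Int)) < 2 * g - 1 then ringsA g (r + 1) else r
termination_by (2 * g - 1 - (1 + 4 * (r : Int))).toNat
decreasing_by
  push_cast
  omega

theorem loop_eq (g : Int) (r : Nat) :
    loopA g (F r) (2 * (r : Int) + 2) = F (ringsA g r) := by
  fun_induction ringsA g r with
  | case1 r hc ih =>
    rw [loopA, if_pos (by rw [lenF]; exact hc)]
    rw [stepF]
    have h2 : (2 * (r : Int) + 2) + 2 = 2 * ((r + 1 : Nat) : Int) + 2 := by push_cast; ring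
    rw [h2, ih]
  | case2 r hc =>
    rw [loopA, if_neg (by rw [lenF]; exact hc)]

theorem ringsA_eq (g : Int) (r : Nat) :
    (ringsA g r : Int) = max (r : Int) (max 0 (-(PySem.Int.floordiv (-(g - 1)) 2))) := by
  have hc := (PySem.Int.neg_floordiv_neg_eq_iff_of_pos (a := g - 1) (b := 2)
      (q := -(PySem.Int.floordiv (-(g - 1)) 2)) (by omega)).mp rfl
  set c := -(PySem.Int.floordiv (-(g - 1)) 2) with hcdef
  fun_induction ringsA g r with
  | case1 r h ih =>
    rw [ih]
    push_cast
    omega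
  | case2 r h =>
    omega

theorem spiral_diag_numbers_alt_eq_F (g : Int) :
    spiral_diag_numbers_alt g = F (max 0 (-(PySem.Int.floordiv (-(g - 1)) 2))).toNat := by
  simp only [spiral_diag_numbers_alt]
  set c := -(PySem.Int.floordiv (-(g - 1)) 2) with hcdef
  set R : Nat := (max 0 c).toNat with hR
  have hRc : (4 * max 0 c + 1 - 1).toNat = 4 * R := by omega
  rw [PySem.List.pyRange_one, hRc, F, List.map_map]
  congr 1
  apply List.map_congr_left
  intro k _
  simp only [Function.comp]
  have h1 : (1 : Int) + (k : Int) + 3 = ((k + 4 : Nat) : Int) := by push_cast; ring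
  have h2 : (1 : Int) + (k : Int) - 1 = ((k : Nat) : Int) := by ring
  have hf : PySem.Int.floordiv (((k + 4 : Nat)) : Int) 4 = ((k / 4 + 1 : Nat) : Int) := by
    have h := PySem.Int.floordiv_natCast (k + 4) 4
    rw [show (k + 4) / 4 = k / 4 + 1 from by omega] at h
    exact_mod_cast h
  have hm : PySem.Int.mod (((k : Nat)) : Int) 4 = ((k % 4 : Nat) : Int) := by
    exact_mod_cast PySem.Int.mod_natCast k 4
  rw [h1, h2, hf, hm]
  rfl

-- ===== VERDICT (by name: the statement is the Claim_ definition above) =====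
theorem spiral_diag_numbers_spec : Claim_equal_spiral_diag_numbers := by
  intro g _
  unfold Spec_spiral_diag_numbers spiral_diag_numbers
  have h0 : ([1] : List Int) = F 0 := by simp [F]
  have h2 : (2 : Int) = 2 * ((0 : Nat) : Int) + 2 := by norm_num
  rw [h0, h2, loop_eq, spiral_diag_numbers_alt_eq_F]
  congr 1
  have := ringsA_eq g 0
  omega
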